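-- pv_equiv track=rewrite | github.com/pypi-data/pypi-mirror-99 | packages/vsg/vsg-3.0.0.tar.gz/vsg-3.0.0/vsg/tokens.py | combine_comments
-- ===== SOURCE A (Python) =====
-- def combine_comments(lChars):
--     lReturn = []
--     sComment = ''
--     bComment = False
--     for sChar in lChars:
--         if sChar.startswith('--') and not bComment:
--             sComment += sChar
--             bComment = True
--             continue
--         if not bComment:
--             lReturn.append(sChar)
--         else:
--             sComment += sChar
--
--     if bComment:
--         lReturn.append(sComment)
--
--     return lReturn
-- ===== SOURCE B (Python) =====
-- def combine_comments(lChars):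
--     for i, sChar in enumerate(lChars):
--         if sChar.startswith('--'):
--             return lChars[:i] + [''.join(lChars[i:])]
--     return list(lChars)
-- ===== Notes on version B (the rewrite author's own statement) =====
-- stated objective: simpler
-- what changed: Replaces the boolean-flag state machine with incremental string concatenation by locating the first '--' token and returning prefix + [join of the suffix].
import Mathlib
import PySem

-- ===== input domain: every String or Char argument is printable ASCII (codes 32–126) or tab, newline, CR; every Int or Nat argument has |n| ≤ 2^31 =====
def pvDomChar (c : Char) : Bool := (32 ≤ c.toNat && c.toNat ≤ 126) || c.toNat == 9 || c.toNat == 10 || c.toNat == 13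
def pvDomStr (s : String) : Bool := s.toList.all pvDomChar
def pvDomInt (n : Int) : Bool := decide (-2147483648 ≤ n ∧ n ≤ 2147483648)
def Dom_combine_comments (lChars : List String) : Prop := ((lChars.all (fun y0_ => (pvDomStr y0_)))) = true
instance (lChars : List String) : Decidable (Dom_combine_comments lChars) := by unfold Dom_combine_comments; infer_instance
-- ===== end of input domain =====

-- B merges the comment by slicing at the first '--' token and joining the suffix,
-- instead of A's boolean-flag accumulator loop (objective: simpler).

-- ===== PORT A =====
-- the loop body of A: state is (lReturn, sComment, bComment)
def stepA (st : List String × String × Bool) (sChar : String) : List String × String × Bool :=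
  if PySem.Str.startswith sChar "--" && !st.2.2 then
    (st.1, st.2.1 ++ sChar, true)
  else if !st.2.2 then
    (st.1 ++ [sChar], st.2.1, st.2.2)
  else
    (st.1, st.2.1 ++ sChar, st.2.2)

def combine_comments (lChars : List String) : List String :=
  let st := lChars.foldl stepA ([], "", false)
  if st.2.2 then st.1 ++ [st.2.1] else st.1

-- ===== PORT B =====
-- Source B walks to the first token starting with '--' and returns prefix ++ [''.join(suffix)]
def combine_comments_alt (lChars : List String) : List String :=
  match lChars with
  | [] => []
  | c :: rest =>
    if PySem.Str.startswith c "--" then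
      [PySem.Str.join "" (c :: rest)]
    else
      c :: combine_comments_alt rest

-- ===== PRECONDITION & SPEC =====
def Spec_combine_comments (lChars : List String) (out : List String) : Prop := out = combine_comments_alt lChars
instance (lChars : List String) (out : List String) : Decidable (Spec_combine_comments lChars out) := by unfold Spec_combine_comments; infer_instance

-- ===== CLAIM (what is proved, stated in full; the proofs are below) =====
def Claim_equal_combine_comments : Prop := ∀ (lChars : List String), Dom_combine_comments lChars → Spec_combine_comments lChars (combine_comments lChars)

-- ===== LEMMAS AND PROOFS =====

theorem jec (c : String) (rest : List String) :
    PySem.Str.join "" (c :: rest) = c ++ PySem.Str.join "" rest := by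
  cases rest with
  | nil => simp [PySem.Str.join, PySem.Chars.join, List.intercalate]
  | cons d t => simp [PySem.Str.join, PySem.Chars.join, List.intercalate]

theorem stepA_true (lR : List String) (sC c : String) :
    stepA (lR, sC, true) c = (lR, sC ++ c, true) := by
  simp [stepA]

theorem stepA_false (lR : List String) (sC c : String) :
    stepA (lR, sC, false) c =
      if PySem.Str.startswith c "--" then (lR, sC ++ c, true) else (lR ++ [c], sC, false) := by
  by_cases h : PySem.Str.startswith c "--" <;> simp [stepA]

-- once bComment is true, the loop only appends every remaining token to sComment
theorem phase2 (rest : List String) (lR : List String) (sC : String) :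
    rest.foldl stepA (lR, sC, true) = (lR, sC ++ PySem.Str.join "" rest, true) := by
  induction rest generalizing sC with
  | nil => simp [PySem.Str.join, PySem.Chars.join, List.intercalate]
  | cons c t ih => rw [List.foldl_cons, stepA_true, ih, jec, ← String.append_assoc]

-- before the first '--' token the loop copies tokens into lReturn
theorem phase1 (l : List String) (lR : List String) :
    (let st := l.foldl stepA (lR, "", false)
     if st.2.2 then st.1 ++ [st.2.1] else st.1) = lR ++ combine_comments_alt l := by
  induction l generalizing lR with
  | nil => simp [combine_comments_alt]
  | cons c t ih =>
    simp only [List.foldl_cons, stepA_false]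
    by_cases h : PySem.Str.startswith c "--" = true
    · rw [if_pos h, phase2]
      simp only [PySem.Str.startswith_eq, show "--".toList = ['-','-'] from rfl] at h
      simp [combine_comments_alt, h, jec]
    · rw [if_neg h, ih]
      simp only [Bool.not_eq_true, PySem.Str.startswith_eq, show "--".toList = ['-','-'] from rfl] at h
      simp [combine_comments_alt, h]

-- ===== VERDICT (by name: the statement is the Claim_ definition above) =====
theorem combine_comments_spec : Claim_equal_combine_comments := by
  intro lChars _
  unfold Spec_combine_comments combine_comments
  simpa using phase1 lChars []
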